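-- pv_equiv track=rewrite | github.com/niduniDK/ProjectEular | pattern.py | anti_clock
-- ===== SOURCE A (Python) =====
-- def anti_clock(a):
--   num_l = [[1]]
--   n = 2
--   for i in range(len(num_l)+2, a+1, 2):
--       num_l.append([])
--       num_l.insert(0, [])
--       # inserting numbers top to bottom
--       for j1 in range(1, i):
--           num_l[j1].append(n)
--           n += 1
--       # inserting numbers right to left
--       for j2 in range(i-2, 0, -1):
--           num_l[i-1].append(n)
--           n += 1
--       num_l[i-1].reverse()
--       # inserting numbers bottom to top
--       for j3 in range(i-1, -1, -1):
--           num_l[j3].insert(0, n)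
--           n += 1
--       # inserting numbers left to right
--       for j4 in range(1, i):
--           num_l[0].append(n)
--           n += 1
--   return num_l
-- ===== SOURCE B (Python) =====
-- def anti_clock(a):
--     m = a if a % 2 else a - 1
--     if m < 1:
--         m = 1
--     c = (m - 1) // 2
--     # ring-boundary bases: left column base (k = c..1) and right column base (k = 1..c)
--     LB = [(2 * k - 1) ** 2 + 5 * k for k in range(c, 0, -1)]
--     RB = [(2 * k - 1) ** 2 + k for k in range(1, c + 1)]
--     rows = []
--     for r in range(m):
--         dr = r - c
--         kr = abs(dr)
--         s = (2 * kr - 1) ** 2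
--         if dr < 0:
--             mid = list(range(s + 6 * kr, s + 8 * kr + 1))
--         elif dr > 0:
--             mid = list(range(s + 4 * kr, s + 2 * kr - 1, -1))
--         else:
--             mid = [1]
--         rows.append([v - dr for v in LB[:c - kr]] + mid
--                     + [v + dr for v in RB[kr:]])
--     return rows
-- ===== Notes on version B (the rewrite author's own statement) =====
-- stated objective: faster
-- what changed: A grows the matrix ring by ring with per-element appends, front-insertions and a reverse (O(a^3) list operations); B computes the size and centre once and emits each row directly as two slices of precomputed ring-boundary base lists plus one consecutive run, with no insertions.
import Mathlib
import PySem

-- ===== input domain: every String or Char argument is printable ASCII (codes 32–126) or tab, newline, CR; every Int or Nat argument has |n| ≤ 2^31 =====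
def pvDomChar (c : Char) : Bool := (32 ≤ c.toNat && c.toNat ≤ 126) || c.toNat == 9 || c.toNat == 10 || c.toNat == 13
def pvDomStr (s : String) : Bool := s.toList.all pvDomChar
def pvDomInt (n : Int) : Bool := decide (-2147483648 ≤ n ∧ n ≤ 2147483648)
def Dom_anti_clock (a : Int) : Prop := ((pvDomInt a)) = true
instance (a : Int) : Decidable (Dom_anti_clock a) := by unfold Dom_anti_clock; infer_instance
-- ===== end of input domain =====

-- B replaces A's layer-by-layer front-insertion construction with a closed-form
-- per-ring row construction (two precomputed boundary-base slices + one consecutive run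
-- per row); equivalence of the return values is proved for all inputs.
-- ===== PORT A =====
-- loop body of A's outer 'for i in range(...)'; every modified index is nonnegative
-- in Python, so 'j.toNat' is exact where it appears
def antiStep (st : List (List Int) × Int) (i : Int) : List (List Int) × Int :=
  -- num_l.append([]); num_l.insert(0, [])
  let L0 : List (List Int) := [] :: (st.1 ++ [[]])
  -- for j1 in range(1, i): num_l[j1].append(n); n += 1
  let s1 := (PySem.List.pyRange 1 i 1).foldl
    (fun st j => (st.1.modify j.toNat (· ++ [st.2]), st.2 + 1)) (L0, st.2)
  -- for j2 in range(i-2, 0, -1): num_l[i-1].append(n); n += 1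
  let s2 := (PySem.List.pyRange (i - 2) 0 (-1)).foldl
    (fun st _ => (st.1.modify (i - 1).toNat (· ++ [st.2]), st.2 + 1)) s1
  -- num_l[i-1].reverse()
  let s2' := (s2.1.modify (i - 1).toNat List.reverse, s2.2)
  -- for j3 in range(i-1, -1, -1): num_l[j3].insert(0, n); n += 1
  let s3 := (PySem.List.pyRange (i - 1) (-1) (-1)).foldl
    (fun st j => (st.1.modify j.toNat (st.2 :: ·), st.2 + 1)) s2'
  -- for j4 in range(1, i): num_l[0].append(n); n += 1
  (PySem.List.pyRange 1 i 1).foldl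
    (fun st _ => (st.1.modify 0 (· ++ [st.2]), st.2 + 1)) s3

-- num_l = [[1]]; n = 2; for i in range(len(num_l)+2, a+1, 2): <antiStep>; return num_l
def anti_clock (a : Int) : List (List Int) :=
  ((PySem.List.pyRange (1 + 2) (a + 1) 2).foldl antiStep ([[1]], 2)).1

-- ===== PORT B =====
-- B: closed-form ring construction — each row is two slices of precomputed ring-boundary
-- bases plus one consecutive run, no per-element insertion (see Source B)
def anti_clock_alt (a : Int) : List (List Int) :=
  let m0 : Int := if PySem.Int.mod a 2 = 0 then a - 1 else a
  let m : Int := if m0 < 1 then 1 else m0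
  let c : Int := PySem.Int.floordiv (m - 1) 2
  let LB := (PySem.List.pyRange c 0 (-1)).map (fun k => (2 * k - 1) ^ 2 + 5 * k)
  let RB := (PySem.List.pyRange 1 (c + 1) 1).map (fun k => (2 * k - 1) ^ 2 + k)
  (PySem.List.pyRange 0 m 1).map (fun r =>
    let dr := r - c
    let kr := |dr|
    let s := (2 * kr - 1) ^ 2
    let mid : List Int :=
      if dr < 0 then PySem.List.pyRange (s + 6 * kr) (s + 8 * kr + 1) 1
      else if 0 < dr then PySem.List.pyRange (s + 4 * kr) (s + 2 * kr - 1) (-1)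
      else [1]
    ((PySem.List.slice LB none (some (c - kr))).map (fun v => v - dr)) ++ mid ++
      ((PySem.List.slice RB (some kr) none).map (fun v => v + dr)))

-- ===== PRECONDITION & SPEC =====
def Spec_anti_clock (a : Int) (out : List (List Int)) : Prop := out = anti_clock_alt a
instance (a : Int) (out : List (List Int)) : Decidable (Spec_anti_clock a out) := by unfold Spec_anti_clock; infer_instance

-- ===== CLAIM (what is proved, stated in full; the proofs are below) =====
def Claim_equal_anti_clock : Prop := ∀ (a : Int), Dom_anti_clock a → Spec_anti_clock a (anti_clock a)

-- ===== LEMMAS AND PROOFS =====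

-- closed-form value of the spiral cell at offset (dr, dc) from the centre
def vcell (dr dc : Int) : Int :=
  let k := max |dr| |dc|
  if k = 0 then 1
  else if dr = -k then (2 * k - 1) ^ 2 + 7 * k + dc
  else if dc = -k then (2 * k - 1) ^ 2 + 5 * k - dr
  else if dr = k then (2 * k - 1) ^ 2 + 3 * k - dc
  else (2 * k - 1) ^ 2 + k + dr

def spiralRow (t : Nat) (dr : Int) : List Int :=
  (List.range (2 * t + 1)).map (fun col : Nat => vcell dr ((col : Int) - (t : Int)))

def spiralM (t : Nat) : List (List Int) :=
  (List.range (2 * t + 1)).map (fun r : Nat => spiralRow t ((r : Int) - (t : Int)))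

def Kn (a : Int) : Nat := ((a - 1) / 2).toNat

def ascN (n : Int) (c : Nat) : List Int := (List.range c).map (fun u : Nat => n + (u : Int))
def descN (n : Int) (c : Nat) : List Int := (List.range c).map (fun u : Nat => n - (u : Int))

lemma ascN_succ_left (n : Int) (c : Nat) : ascN n (c + 1) = n :: ascN (n + 1) c := by
  apply List.ext_getElem (by simp [ascN])
  intro i h1 h2
  rcases i with _ | j <;>
    simp only [ascN, List.getElem_map, List.getElem_range, List.getElem_cons_zero,
      List.getElem_cons_succ, Nat.cast_zero, Nat.cast_add, Nat.cast_one] <;> ring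

lemma descN_succ_left (n : Int) (c : Nat) : descN n (c + 1) = n :: descN (n - 1) c := by
  apply List.ext_getElem (by simp [descN])
  intro i h1 h2
  rcases i with _ | j <;>
    simp only [descN, List.getElem_map, List.getElem_range, List.getElem_cons_zero,
      List.getElem_cons_succ, Nat.cast_zero, Nat.cast_add, Nat.cast_one] <;> ring

lemma descN_succ_right (n : Int) (c : Nat) : descN n (c + 1) = descN n c ++ [n - c] := by
  simp [descN, List.range_succ]

lemma reverse_ascN (n : Int) (c : Nat) : (ascN n c).reverse = descN (n + c - 1) c := by
  induction c generalizing n with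
  | zero => simp [ascN, descN]
  | succ c ih =>
    rw [ascN_succ_left, List.reverse_cons, ih, descN_succ_right]
    congr 2 <;> push_cast <;> ring

lemma modify_append_cons {α : Type} (P Q : List α) (q : α) (f : α → α) :
    (P ++ q :: Q).modify P.length f = P ++ f q :: Q := by
  simp [List.modify_eq_set_getElem?]

lemma mapIdx_map_range {α β : Type} (g : Nat → α → β) (f : Nat → α) (n : Nat) :
    List.mapIdx g ((List.range n).map f) = (List.range n).map (fun r => g r (f r)) := by
  induction n with
  | zero => simp
  | succ n ih => simp [List.range_succ, List.mapIdx_append, ih]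

lemma fold1 (Q P : List (List Int)) (n aI bI : Int)
    (ha : aI = P.length) (hb : bI = P.length + Q.length) :
    (PySem.List.pyRange aI bI 1).foldl
      (fun st j => (st.1.modify j.toNat (· ++ [st.2]), st.2 + 1)) (P ++ Q, n)
    = (P ++ Q.mapIdx (fun u row => row ++ [n + (u : Int)]), n + Q.length) := by
  induction Q generalizing P n aI bI with
  | nil =>
    have hle : bI ≤ aI := by rw [ha, hb]; simp
    rw [PySem.List.pyRange_one_eq_nil hle]
    simp
  | cons q Q ih =>
    have hlt : aI < bI := by rw [ha, hb]; simp
    rw [PySem.List.pyRange_one_cons hlt, List.foldl_cons]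
    have e1 : (P ++ q :: Q).modify aI.toNat (· ++ [n]) = (P ++ [q ++ [n]]) ++ Q := by
      rw [ha, Int.toNat_natCast, modify_append_cons]
      simp
    rw [show ((P ++ q :: Q, n).1.modify aI.toNat (· ++ [(P ++ q :: Q, n).2]), (P ++ q :: Q, n).2 + 1)
          = ((P ++ [q ++ [n]]) ++ Q, n + 1) from by simp [e1]]
    rw [ih (P ++ [q ++ [n]]) (n + 1) (aI + 1) bI (by simp [ha]) (by rw [hb]; simp; push_cast; ring)]
    simp only [Prod.mk.injEq]
    refine ⟨?_, ?_⟩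
    · rw [List.mapIdx_cons, List.append_assoc, List.singleton_append]
      congr 1
      congr 1
      · simp
      · congr 1
        funext u row
        congr 2
        push_cast; ring
    · push_cast [List.length_cons]; ring

lemma fold2 (js : List Int) (idx : Nat) (P : List (List Int)) (q : List Int) (n : Int)
    (h : idx = P.length) :
    js.foldl (fun st _ => (st.1.modify idx (· ++ [st.2]), st.2 + 1)) (P ++ [q], n)
    = (P ++ [q ++ ascN n js.length], n + js.length) := by
  induction js generalizing q n with
  | nil => simp [ascN]
  | cons j js ih =>
    simp only [List.foldl_cons]
    have e : (P ++ [q]).modify idx (· ++ [n]) = P ++ [q ++ [n]] := by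
      rw [h]; exact modify_append_cons P [] q (· ++ [n])
    rw [show ((P ++ [q], n).1.modify idx (· ++ [(P ++ [q], n).2]), (P ++ [q], n).2 + 1)
          = (P ++ [q ++ [n]], n + 1) from by simp [e], ih]
    rw [List.length_cons, ascN_succ_left]
    refine Prod.ext ?_ ?_
    · simp
    · push_cast; ring

lemma fold3 (Lo Hi : List (List Int)) (n aI : Int) (ha : aI = (Lo.length : Int) - 1) :
    (PySem.List.pyRange aI (-1) (-1)).foldl
      (fun st j => (st.1.modify j.toNat (st.2 :: ·), st.2 + 1)) (Lo ++ Hi, n)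
    = (Lo.mapIdx (fun u row => (n + ((Lo.length : Int) - 1 - (u : Int))) :: row) ++ Hi,
       n + Lo.length) := by
  induction Lo using List.reverseRecOn generalizing Hi n aI with
  | nil =>
    have hle : aI ≤ -1 := by rw [ha]; simp
    rw [PySem.List.pyRange_neg_one_eq_nil hle]
    simp
  | append_singleton L x ih =>
    simp only [List.length_append, List.length_cons, List.length_nil, Nat.zero_add,
      Nat.add_zero] at ha ⊢
    have hlt : (-1 : Int) < aI := by rw [ha]; push_cast; omega
    rw [PySem.List.pyRange_neg_one_cons hlt, List.foldl_cons]
    have hL : aI.toNat = L.length := by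
      rw [ha]; push_cast; omega
    have e1 : (L ++ x :: Hi).modify aI.toNat (n :: ·) = L ++ (n :: x) :: Hi := by
      rw [hL, modify_append_cons]
    rw [List.append_assoc, List.singleton_append]
    rw [show ((L ++ x :: Hi, n).1.modify aI.toNat ((((L ++ x :: Hi, n).2) :: ·)), ((L ++ x :: Hi, n).2) + 1)
          = (L ++ (n :: x) :: Hi, n + 1) from by simp [e1]]
    rw [ih ((n :: x) :: Hi) (n + 1) (aI - 1) (by rw [ha]; push_cast; ring)]
    simp only [Prod.mk.injEq]
    refine ⟨?_, ?_⟩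
    · rw [List.mapIdx_append]
      simp only [List.mapIdx_cons, List.mapIdx_nil]
      rw [List.append_assoc, List.singleton_append]
      simp only [List.length_append, List.length_cons, List.length_nil, Nat.zero_add,
        Nat.add_zero]
      congr 1
      · congr 1
        funext u row
        congr 1
        push_cast; ring
      · congr 2
        push_cast; ring
    · push_cast; ring

lemma fold4 (js : List Int) (q : List Int) (R : List (List Int)) (n : Int) :
    js.foldl (fun st _ => (st.1.modify 0 (· ++ [st.2]), st.2 + 1)) (q :: R, n)
    = ((q ++ ascN n js.length) :: R, n + js.length) := by
  induction js generalizing q n with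
  | nil => simp [ascN]
  | cons j js ih =>
    simp only [List.foldl_cons]
    have e : (q :: R).modify 0 (· ++ [n]) = (q ++ [n]) :: R := by
      simpa using modify_append_cons [] R q (· ++ [n])
    rw [show ((q :: R, n).1.modify 0 (· ++ [(q :: R, n).2]), (q :: R, n).2 + 1)
          = ((q ++ [n]) :: R, n + 1) from by simp [e], ih]
    rw [List.length_cons, ascN_succ_left]
    refine Prod.ext ?_ ?_
    · simp
    · push_cast; ring

lemma vcell_eval_left (dr k : Int) (h1 : |dr| < k) :
    vcell dr (-k) = (2 * k - 1) ^ 2 + 5 * k - dr := by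
  have h0 : 0 ≤ |dr| := abs_nonneg dr
  have hm : max |dr| |(-k)| = k := by
    rw [abs_neg, abs_of_pos (a := k) (by omega)]
    exact max_eq_right (le_of_lt h1)
  simp only [vcell, hm]
  rw [if_neg (by omega), if_neg (by cases abs_cases dr <;> omega)]
  simp

lemma vcell_eval_right (dr k : Int) (h1 : |dr| < k) :
    vcell dr k = (2 * k - 1) ^ 2 + k + dr := by
  have h0 : 0 ≤ |dr| := abs_nonneg dr
  have hm : max |dr| |k| = k := by
    rw [abs_of_pos (a := k) (by omega)]; exact max_eq_right (le_of_lt h1)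
  simp only [vcell, hm]
  rw [if_neg (by omega), if_neg (by cases abs_cases dr <;> omega),
      if_neg (by omega), if_neg (by cases abs_cases dr <;> omega)]

lemma vcell_eval_top (dc k : Int) (h : |dc| ≤ k) (hk : 0 < k) :
    vcell (-k) dc = (2 * k - 1) ^ 2 + 7 * k + dc := by
  have hm : max |(-k)| |dc| = k := by rw [abs_neg, abs_of_pos (a := k) hk]; exact max_eq_left h
  simp only [vcell, hm]
  rw [if_neg (by omega)]
  simp

lemma vcell_eval_bot (dc k : Int) (h : |dc| ≤ k) (hk : 0 < k) :
    vcell k dc = (2 * k - 1) ^ 2 + 3 * k - dc := by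
  have hm : max |k| |dc| = k := by rw [abs_of_pos (a := k) hk]; exact max_eq_left h
  simp only [vcell, hm]
  by_cases hdc : dc = -k
  · rw [if_neg (by omega), if_neg (by omega), if_pos hdc]
    omega
  · rw [if_neg (by omega), if_neg (by omega), if_neg hdc]
    simp

lemma rowsplit (t : Nat) (dr : Int) :
    spiralRow (t + 1) dr
    = vcell dr (-((t : Int) + 1)) :: (spiralRow t dr ++ [vcell dr ((t : Int) + 1)]) := by
  apply List.ext_getElem (by simp [spiralRow]; omega)
  intro i h1 h2
  rcases i with _ | j
  · simp only [spiralRow, List.getElem_map, List.getElem_range, List.getElem_cons_zero]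
    norm_num
  · simp only [spiralRow, List.getElem_map, List.getElem_range, List.getElem_cons_succ]
    by_cases hj : j < 2 * t + 1
    · rw [List.getElem_append_left (by simpa [spiralRow] using hj)]
      simp only [spiralRow, List.getElem_map, List.getElem_range]
      congr 1; push_cast; ring
    · have hj2 : j = 2 * t + 1 := by
        simp only [spiralRow, List.length_map, List.length_range] at h1; omega
      subst hj2
      rw [List.getElem_append_right (by simp [spiralRow])]
      simp only [spiralRow, List.length_map, List.length_range]
      simp only [Nat.sub_self, List.getElem_singleton]
      congr 1; push_cast; ring

lemma Msplit (t : Nat) :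
    spiralM (t + 1)
    = spiralRow (t + 1) (-((t : Int) + 1)) ::
        (((List.range (2 * t + 1)).map (fun u : Nat => spiralRow (t + 1) ((u : Int) - (t : Int)))) ++
          [spiralRow (t + 1) ((t : Int) + 1)]) := by
  apply List.ext_getElem (by simp [spiralM]; omega)
  intro i h1 h2
  rcases i with _ | j
  · simp only [spiralM, List.getElem_map, List.getElem_range, List.getElem_cons_zero]
    norm_num
  · simp only [spiralM, List.getElem_map, List.getElem_range, List.getElem_cons_succ]
    by_cases hj : j < 2 * t + 1
    · rw [List.getElem_append_left (by simpa using hj)]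
      simp only [List.getElem_map, List.getElem_range]
      congr 1; push_cast; ring
    · have hj2 : j = 2 * t + 1 := by
        simp only [spiralM, List.length_map, List.length_range] at h1; omega
      subst hj2
      rw [List.getElem_append_right (by simp)]
      simp only [List.length_map, List.length_range]
      simp only [Nat.sub_self, List.getElem_singleton]
      congr 1; push_cast; ring

lemma length_spiralM (t : Nat) : (spiralM t).length = 2 * t + 1 := by
  simp [spiralM]


lemma abs_le_of_mid (t u : Nat) (hu : u < 2 * t + 1) : |(u : Int) - (t : Int)| ≤ (t : Int) := by
  cases abs_cases ((u : Int) - (t : Int)) <;> omega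

lemma rowTop (t : Nat) :
    spiralRow (t + 1) (-((t : Int) + 1)) = ascN ((2 * (t : Int) + 1) ^ 2 + 6 * (t : Int) + 6) (2 * (t + 1) + 1) := by
  rw [spiralRow, ascN]
  apply List.map_congr_left
  intro u hu
  rw [List.mem_range] at hu
  rw [vcell_eval_top _ _ (by cases abs_cases ((u : Int) - ((t : Int) + 1)) <;> push_cast <;> omega) (by omega)]
  push_cast; ring

lemma rowBot (t : Nat) :
    spiralRow (t + 1) ((t : Int) + 1) = descN ((2 * (t : Int) + 1) ^ 2 + 4 * (t : Int) + 4) (2 * (t + 1) + 1) := by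
  rw [spiralRow, descN]
  apply List.map_congr_left
  intro u hu
  rw [List.mem_range] at hu
  rw [vcell_eval_bot _ _ (by cases abs_cases ((u : Int) - ((t : Int) + 1)) <;> push_cast <;> omega) (by omega)]
  push_cast; ring

lemma mapIdxExpand (f : Nat → List Int → List Int) (A : List (List Int)) (b : List Int) :
    List.mapIdx f ((([] : List Int) :: A) ++ [b])
    = f 0 [] :: (A.mapIdx (fun u row => f (u + 1) row) ++ [f (A.length + 1) b]) := by
  rw [List.mapIdx_append, List.mapIdx_cons]
  simp [List.mapIdx_cons]

lemma topRowEq (t : Nat) :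
    [((2 * (t : Int) + 1) ^ 2 + 1) + (6 * (t : Int) + 5)] ++ ascN (((2 * (t : Int) + 1) ^ 2 + 1) + (6 * (t : Int) + 6)) (2 * t + 2)
    = spiralRow (t + 1) (-((t : Int) + 1)) := by
  rw [List.singleton_append, rowTop t]
  rw [show ((2 * (t : Int) + 1) ^ 2 + 1) + (6 * (t : Int) + 6) = (((2 * (t : Int) + 1) ^ 2 + 1) + (6 * (t : Int) + 5)) + 1 from by ring]
  rw [← ascN_succ_left]
  congr 1
  ring

lemma botRowEq (t : Nat) :
    (((2 * (t : Int) + 1) ^ 2 + 1) + (4 * (t : Int) + 3)) ::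
      (descN (((2 * (t : Int) + 1) ^ 2 + 1) + (4 * (t : Int) + 2)) (2 * t + 1) ++ [((2 * (t : Int) + 1) ^ 2 + 1) + (2 * (t : Int) + 1)])
    = spiralRow (t + 1) ((t : Int) + 1) := by
  rw [rowBot t]
  rw [show ((2 * (t : Int) + 1) ^ 2 + 1) + (4 * (t : Int) + 2) = (((2 * (t : Int) + 1) ^ 2 + 1) + (4 * (t : Int) + 3)) - 1 from by ring]
  rw [show ((2 * (t : Int) + 1) ^ 2 + 1) + (2 * (t : Int) + 1)
        = (((2 * (t : Int) + 1) ^ 2 + 1) + (4 * (t : Int) + 3)) - 1 - ((2 * t + 1 : Nat) : Int) from by push_cast; ring]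
  rw [← descN_succ_right, ← descN_succ_left]
  congr 1
  omega

lemma midRowsEq (t : Nat) :
    ((spiralM t).mapIdx (fun u row => row ++ [((2 * (t : Int) + 1) ^ 2 + 1) + (u : Int)])).mapIdx (fun u row => ((((2 * (t : Int) + 1) ^ 2 + 1) + (6 * (t : Int) + 4)) - (u : Int)) :: row)
    = (List.range (2 * t + 1)).map (fun u : Nat => spiralRow (t + 1) ((u : Int) - (t : Int))) := by
  rw [show spiralM t = (List.range (2 * t + 1)).map
        (fun r : Nat => spiralRow t ((r : Int) - (t : Int))) from rfl]
  rw [mapIdx_map_range, mapIdx_map_range]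
  apply List.map_congr_left
  intro u hu
  rw [List.mem_range] at hu
  rw [rowsplit t ((u : Int) - (t : Int))]
  have habs : |(u : Int) - (t : Int)| < (t : Int) + 1 := by
    have := abs_le_of_mid t u hu; omega
  rw [vcell_eval_left _ _ habs, vcell_eval_right _ _ habs]
  congr 1
  · push_cast; ring
  · congr 1
    congr 1
    push_cast; ring

lemma stepLemma (t : Nat) :
    antiStep (spiralM t, (2 * (t : Int) + 1) ^ 2 + 1) (2 * (t : Int) + 3)
    = (spiralM (t + 1), (2 * (t : Int) + 3) ^ 2 + 1) := by
  simp only [antiStep]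
  have h1 : (PySem.List.pyRange 1 (2 * (t : Int) + 3) 1).foldl
      (fun st j => (st.1.modify j.toNat (· ++ [st.2]), st.2 + 1))
      (([] : List Int) :: (spiralM t ++ [[]]), ((2 * (t : Int) + 1) ^ 2 + 1))
      = (([] : List Int) :: ((spiralM t).mapIdx (fun u row => row ++ [((2 * (t : Int) + 1) ^ 2 + 1) + (u : Int)]) ++ [[((2 * (t : Int) + 1) ^ 2 + 1) + (2 * (t : Int) + 1)]]),
         ((2 * (t : Int) + 1) ^ 2 + 1) + (2 * (t : Int) + 2)) := by
    rw [show (([] : List Int) :: (spiralM t ++ [[]])) = [([] : List Int)] ++ (spiralM t ++ [[]]) from rfl]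
    rw [fold1 (spiralM t ++ [[]]) [[]] ((2 * (t : Int) + 1) ^ 2 + 1) 1 (2 * (t : Int) + 3) (by simp)
        (by simp [length_spiralM]; push_cast; ring)]
    refine Prod.ext ?_ ?_
    · show [([] : List Int)] ++ _ = _
      rw [List.mapIdx_append]
      simp [length_spiralM]
    · show ((2 * (t : Int) + 1) ^ 2 + 1) + _ = ((2 * (t : Int) + 1) ^ 2 + 1) + (2 * (t : Int) + 2)
      simp [length_spiralM]; push_cast; ring
  rw [h1]
  have h2 : (PySem.List.pyRange (2 * (t : Int) + 3 - 2) 0 (-1)).foldl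
      (fun st _ => (st.1.modify (2 * (t : Int) + 3 - 1).toNat (· ++ [st.2]), st.2 + 1))
      (([] : List Int) :: ((spiralM t).mapIdx (fun u row => row ++ [((2 * (t : Int) + 1) ^ 2 + 1) + (u : Int)]) ++ [[((2 * (t : Int) + 1) ^ 2 + 1) + (2 * (t : Int) + 1)]]), ((2 * (t : Int) + 1) ^ 2 + 1) + (2 * (t : Int) + 2))
      = ((([] : List Int) :: (spiralM t).mapIdx (fun u row => row ++ [((2 * (t : Int) + 1) ^ 2 + 1) + (u : Int)])) ++
          [[((2 * (t : Int) + 1) ^ 2 + 1) + (2 * (t : Int) + 1)] ++ ascN (((2 * (t : Int) + 1) ^ 2 + 1) + (2 * (t : Int) + 2)) (2 * t + 1)],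
         ((2 * (t : Int) + 1) ^ 2 + 1) + (4 * (t : Int) + 3)) := by
    rw [show (([] : List Int) :: ((spiralM t).mapIdx (fun u row => row ++ [((2 * (t : Int) + 1) ^ 2 + 1) + (u : Int)]) ++ [[((2 * (t : Int) + 1) ^ 2 + 1) + (2 * (t : Int) + 1)]]))
          = (([] : List Int) :: (spiralM t).mapIdx (fun u row => row ++ [((2 * (t : Int) + 1) ^ 2 + 1) + (u : Int)])) ++ [[((2 * (t : Int) + 1) ^ 2 + 1) + (2 * (t : Int) + 1)]] from rfl]
    rw [fold2 _ _ _ _ _ (by simp [length_spiralM]; omega)]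
    rw [PySem.List.length_pyRange_neg_one,
        show (2 * (t : Int) + 3 - 2 - 0).toNat = 2 * t + 1 from by omega]
    refine Prod.ext rfl ?_
    show ((2 * (t : Int) + 1) ^ 2 + 1) + (2 * (t : Int) + 2) + ((2 * t + 1 : Nat) : Int) = _
    push_cast; ring
  rw [h2]
  have h2r : ((([] : List Int) :: (spiralM t).mapIdx (fun u row => row ++ [((2 * (t : Int) + 1) ^ 2 + 1) + (u : Int)])) ++
        [[((2 * (t : Int) + 1) ^ 2 + 1) + (2 * (t : Int) + 1)] ++ ascN (((2 * (t : Int) + 1) ^ 2 + 1) + (2 * (t : Int) + 2)) (2 * t + 1)]).modify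
        (2 * (t : Int) + 3 - 1).toNat List.reverse
      = (([] : List Int) :: (spiralM t).mapIdx (fun u row => row ++ [((2 * (t : Int) + 1) ^ 2 + 1) + (u : Int)])) ++
        [descN (((2 * (t : Int) + 1) ^ 2 + 1) + (4 * (t : Int) + 2)) (2 * t + 1) ++ [((2 * (t : Int) + 1) ^ 2 + 1) + (2 * (t : Int) + 1)]] := by
    rw [show (2 * (t : Int) + 3 - 1).toNat = (([] : List Int) :: (spiralM t).mapIdx (fun u row => row ++ [((2 * (t : Int) + 1) ^ 2 + 1) + (u : Int)])).length from by
      simp [length_spiralM]; omega]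
    rw [modify_append_cons]
    congr 2
    rw [List.reverse_append, reverse_ascN]
    simp
    congr 1
    push_cast; ring
  rw [h2r]
  have h3 : (PySem.List.pyRange (2 * (t : Int) + 3 - 1) (-1) (-1)).foldl
      (fun st j => (st.1.modify j.toNat (st.2 :: ·), st.2 + 1))
      ((([] : List Int) :: (spiralM t).mapIdx (fun u row => row ++ [((2 * (t : Int) + 1) ^ 2 + 1) + (u : Int)])) ++
        [descN (((2 * (t : Int) + 1) ^ 2 + 1) + (4 * (t : Int) + 2)) (2 * t + 1) ++ [((2 * (t : Int) + 1) ^ 2 + 1) + (2 * (t : Int) + 1)]],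
       ((2 * (t : Int) + 1) ^ 2 + 1) + (4 * (t : Int) + 3))
      = ([((2 * (t : Int) + 1) ^ 2 + 1) + (6 * (t : Int) + 5)] ::
          (((spiralM t).mapIdx (fun u row => row ++ [((2 * (t : Int) + 1) ^ 2 + 1) + (u : Int)])).mapIdx
              (fun u row => ((((2 * (t : Int) + 1) ^ 2 + 1) + (6 * (t : Int) + 4)) - (u : Int)) :: row) ++
            [(((2 * (t : Int) + 1) ^ 2 + 1) + (4 * (t : Int) + 3)) ::
              (descN (((2 * (t : Int) + 1) ^ 2 + 1) + (4 * (t : Int) + 2)) (2 * t + 1) ++ [((2 * (t : Int) + 1) ^ 2 + 1) + (2 * (t : Int) + 1)])]),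
         ((2 * (t : Int) + 1) ^ 2 + 1) + (6 * (t : Int) + 6)) := by
    rw [show ((([] : List Int) :: (spiralM t).mapIdx (fun u row => row ++ [((2 * (t : Int) + 1) ^ 2 + 1) + (u : Int)])) ++
          [descN (((2 * (t : Int) + 1) ^ 2 + 1) + (4 * (t : Int) + 2)) (2 * t + 1) ++ [((2 * (t : Int) + 1) ^ 2 + 1) + (2 * (t : Int) + 1)]] : List (List Int))
        = ((([] : List Int) :: (spiralM t).mapIdx (fun u row => row ++ [((2 * (t : Int) + 1) ^ 2 + 1) + (u : Int)])) ++
          [descN (((2 * (t : Int) + 1) ^ 2 + 1) + (4 * (t : Int) + 2)) (2 * t + 1) ++ [((2 * (t : Int) + 1) ^ 2 + 1) + (2 * (t : Int) + 1)]]) ++ []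
        from (List.append_nil _).symm]
    rw [fold3 _ _ _ _ (by simp [length_spiralM]; push_cast; ring)]
    rw [List.append_nil, mapIdxExpand]
    simp only [List.length_append, List.length_cons, List.length_mapIdx, length_spiralM,
      List.length_nil]
    refine Prod.ext ?_ ?_
    · show _ :: _ = _ :: _
      congr 1
      · congr 1
        push_cast; ring
      · congr 1
        · congr 1
          funext u row
          congr 1
          push_cast; ring
        · congr 2
          push_cast; ring
    · show _ + _ = _
      push_cast; ring
  rw [h3]
  have h4 : (PySem.List.pyRange 1 (2 * (t : Int) + 3) 1).foldl
      (fun st _ => (st.1.modify 0 (· ++ [st.2]), st.2 + 1))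
      ([((2 * (t : Int) + 1) ^ 2 + 1) + (6 * (t : Int) + 5)] ::
          (((spiralM t).mapIdx (fun u row => row ++ [((2 * (t : Int) + 1) ^ 2 + 1) + (u : Int)])).mapIdx
              (fun u row => ((((2 * (t : Int) + 1) ^ 2 + 1) + (6 * (t : Int) + 4)) - (u : Int)) :: row) ++
            [(((2 * (t : Int) + 1) ^ 2 + 1) + (4 * (t : Int) + 3)) ::
              (descN (((2 * (t : Int) + 1) ^ 2 + 1) + (4 * (t : Int) + 2)) (2 * t + 1) ++ [((2 * (t : Int) + 1) ^ 2 + 1) + (2 * (t : Int) + 1)])]),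
       ((2 * (t : Int) + 1) ^ 2 + 1) + (6 * (t : Int) + 6))
      = (([((2 * (t : Int) + 1) ^ 2 + 1) + (6 * (t : Int) + 5)] ++ ascN (((2 * (t : Int) + 1) ^ 2 + 1) + (6 * (t : Int) + 6)) (2 * t + 2)) ::
          (((spiralM t).mapIdx (fun u row => row ++ [((2 * (t : Int) + 1) ^ 2 + 1) + (u : Int)])).mapIdx
              (fun u row => ((((2 * (t : Int) + 1) ^ 2 + 1) + (6 * (t : Int) + 4)) - (u : Int)) :: row) ++
            [(((2 * (t : Int) + 1) ^ 2 + 1) + (4 * (t : Int) + 3)) ::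
              (descN (((2 * (t : Int) + 1) ^ 2 + 1) + (4 * (t : Int) + 2)) (2 * t + 1) ++ [((2 * (t : Int) + 1) ^ 2 + 1) + (2 * (t : Int) + 1)])]),
         ((2 * (t : Int) + 1) ^ 2 + 1) + (8 * (t : Int) + 8)) := by
    rw [fold4]
    rw [PySem.List.length_pyRange_one,
        show (2 * (t : Int) + 3 - 1).toNat = 2 * t + 2 from by omega]
    refine Prod.ext rfl ?_
    show ((2 * (t : Int) + 1) ^ 2 + 1) + (6 * (t : Int) + 6) + ((2 * t + 2 : Nat) : Int) = _
    push_cast; ring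
  rw [h4]
  rw [show (([((2 * (t : Int) + 1) ^ 2 + 1) + (6 * (t : Int) + 5)] ++ ascN (((2 * (t : Int) + 1) ^ 2 + 1) + (6 * (t : Int) + 6)) (2 * t + 2)) ::
          (((spiralM t).mapIdx (fun u row => row ++ [((2 * (t : Int) + 1) ^ 2 + 1) + (u : Int)])).mapIdx
              (fun u row => ((((2 * (t : Int) + 1) ^ 2 + 1) + (6 * (t : Int) + 4)) - (u : Int)) :: row) ++
            [(((2 * (t : Int) + 1) ^ 2 + 1) + (4 * (t : Int) + 3)) ::
              (descN (((2 * (t : Int) + 1) ^ 2 + 1) + (4 * (t : Int) + 2)) (2 * t + 1) ++ [((2 * (t : Int) + 1) ^ 2 + 1) + (2 * (t : Int) + 1)])]) : List (List Int))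
      = spiralM (t + 1) from by
    rw [topRowEq, midRowsEq, botRowEq, Msplit t]]
  refine Prod.ext rfl ?_
  show ((2 * (t : Int) + 1) ^ 2 + 1) + (8 * (t : Int) + 8) = _
  push_cast; ring

lemma foldA (T : Nat) :
    ((List.range T).map (fun k : Nat => (3 : Int) + 2 * (k : Int))).foldl antiStep ([[1]], 2)
    = (spiralM T, (2 * (T : Int) + 1) ^ 2 + 1) := by
  induction T with
  | zero =>
    refine Prod.ext ?_ ?_
    · show [[1]] = spiralM 0
      decide
    · norm_num
  | succ T ih =>
    rw [List.range_succ, List.map_append, List.foldl_append, ih]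
    simp only [List.map_cons, List.map_nil, List.foldl_cons, List.foldl_nil]
    rw [show (3 : Int) + 2 * (T : Int) = 2 * (T : Int) + 3 from by ring, stepLemma T]
    refine Prod.ext rfl ?_
    show (2 * (T : Int) + 3) ^ 2 + 1 = _
    push_cast; ring

lemma aEq (a : Int) : anti_clock a = spiralM (Kn a) := by
  unfold anti_clock
  rw [PySem.List.pyRange_of_pos _ _ (by norm_num)]
  have hcnt : (if (1 + 2 : Int) < a + 1 then ((a + 1 - (1 + 2) + 2 - 1) / 2).toNat else 0) = Kn a := by
    unfold Kn
    split_ifs with h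
    · congr 1
      omega
    · omega
  rw [hcnt]
  have : (List.map (fun k : Nat => (1 + 2 : Int) + 2 * (k : Int)) (List.range (Kn a))).foldl antiStep ([[1]], 2)
      = (spiralM (Kn a), (2 * ((Kn a : Nat) : Int) + 1) ^ 2 + 1) := by
    rw [show (fun k : Nat => (1 + 2 : Int) + 2 * (k : Int)) = (fun k : Nat => (3 : Int) + 2 * (k : Int)) from by norm_num]
    exact foldA (Kn a)
  rw [this]

lemma drop_range (m n : Nat) : (List.range n).drop m = (List.range (n - m)).map (fun i => m + i) := by
  apply List.ext_getElem (by simp)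
  intro i h1 h2
  simp [List.getElem_drop]

lemma map_range_split3 {α : Type} (f : Nat → α) (x y : Nat) :
    (List.range (x + (y + x))).map f
    = (List.range x).map f ++
      ((List.range y).map (fun u => f (x + u)) ++ (List.range x).map (fun u => f (x + (y + u)))) := by
  simp [List.range_add, Function.comp_def]

lemma rowAlt (K : Nat) (r : Nat) (hr : r < 2 * K + 1) :
    ((PySem.List.slice ((PySem.List.pyRange (K : Int) 0 (-1)).map (fun k => (2 * k - 1) ^ 2 + 5 * k))
        none (some ((K : Int) - |(r : Int) - (K : Int)|))).map (fun v => v - ((r : Int) - (K : Int)))) ++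
      ((if (r : Int) - (K : Int) < 0 then
          PySem.List.pyRange ((2 * |(r : Int) - (K : Int)| - 1) ^ 2 + 6 * |(r : Int) - (K : Int)|)
            ((2 * |(r : Int) - (K : Int)| - 1) ^ 2 + 8 * |(r : Int) - (K : Int)| + 1) 1
        else if 0 < (r : Int) - (K : Int) then
          PySem.List.pyRange ((2 * |(r : Int) - (K : Int)| - 1) ^ 2 + 4 * |(r : Int) - (K : Int)|)
            ((2 * |(r : Int) - (K : Int)| - 1) ^ 2 + 2 * |(r : Int) - (K : Int)| - 1) (-1)
        else [1]) ++
      ((PySem.List.slice ((PySem.List.pyRange 1 ((K : Int) + 1) 1).map (fun k => (2 * k - 1) ^ 2 + k))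
        (some |(r : Int) - (K : Int)|) none).map (fun v => v + ((r : Int) - (K : Int)))))
    = spiralRow K ((r : Int) - (K : Int)) := by
  obtain ⟨jr, hjr, hjrK, hdr⟩ :
      ∃ jr : Nat, |(r : Int) - (K : Int)| = (jr : Int) ∧ jr ≤ K ∧
        ((r : Int) - (K : Int) = (jr : Int) ∨ (r : Int) - (K : Int) = -(jr : Int)) := by
    rcases Nat.le_total r K with h | h
    · exact ⟨K - r, by cases abs_cases ((r : Int) - (K : Int)) <;> push_cast <;> omega,
        by omega, Or.inr (by push_cast; omega)⟩
    · exact ⟨r - K, by cases abs_cases ((r : Int) - (K : Int)) <;> push_cast <;> omega,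
        by omega, Or.inl (by push_cast; omega)⟩
  rw [hjr]
  -- left slice
  rw [PySem.List.pyRange_neg_one, show ((K : Int) - 0).toNat = K from by omega]
  rw [PySem.List.slice_to _ (by omega), show ((K : Int) - (jr : Int)).toNat = K - jr from by omega]
  rw [← List.map_take, ← List.map_take, List.take_range, Nat.min_eq_left (by omega), List.map_map]
  -- right slice
  rw [PySem.List.pyRange_one 1 ((K : Int) + 1), show ((K : Int) + 1 - 1).toNat = K from by omega]
  rw [PySem.List.slice_from _ (by positivity), show ((jr : Int)).toNat = jr from by omega]
  rw [← List.map_drop, ← List.map_drop, drop_range, List.map_map, List.map_map]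
  -- target
  rw [spiralRow, show 2 * K + 1 = (K - jr) + ((2 * jr + 1) + (K - jr)) from by omega,
      map_range_split3]
  congr 1
  · -- left segment
    apply List.map_congr_left
    intro j hj
    rw [List.mem_range] at hj
    simp only [Function.comp]
    rw [show ((j : Int) - (K : Int)) = -((K : Int) - (j : Int)) from by ring]
    rw [vcell_eval_left _ _ (by rw [hjr]; push_cast; omega)]
  congr 1
  · -- middle segment
    rcases eq_or_ne jr 0 with h0 | h0
    · subst h0
      have hdr0 : (r : Int) - (K : Int) = 0 := by omega
      rw [hdr0, if_neg (by omega), if_neg (by omega)]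
      apply List.ext_getElem (by simp)
      intro i h1 h2
      have hi : i = 0 := by simp at h1; omega
      subst hi
      simp only [List.getElem_map, List.getElem_range, List.getElem_cons_zero]
      rw [show ((K - 0 + 0 : Nat) : Int) - (K : Int) = 0 from by push_cast; omega]
      simp [vcell]
    · rcases hdr with hpos | hneg
      · -- dr = jr > 0 : bottom-type row
        rw [hpos, if_neg (by omega), if_pos (by omega)]
        rw [PySem.List.pyRange_neg_one]
        have e2 : ((2 * (jr : Int) - 1) ^ 2 + 4 * (jr : Int) -
            ((2 * (jr : Int) - 1) ^ 2 + 2 * (jr : Int) - 1)).toNat = 2 * jr + 1 := by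
          have e1 : ((2 * (jr : Int) - 1) ^ 2 + 4 * (jr : Int) -
              ((2 * (jr : Int) - 1) ^ 2 + 2 * (jr : Int) - 1)) = ((2 * jr + 1 : Nat) : Int) := by
            push_cast; ring
          rw [e1, Int.toNat_natCast]
        rw [e2]
        apply List.map_congr_left
        intro u hu
        rw [List.mem_range] at hu
        rw [show ((K - jr + u : Nat) : Int) - (K : Int) = (u : Int) - (jr : Int) from by
          push_cast; omega]
        rw [vcell_eval_bot _ _ (by cases abs_cases ((u : Int) - (jr : Int)) <;> push_cast <;> omega)
            (by omega)]
        push_cast; ring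
      · -- dr = -jr < 0 : top-type row
        rw [hneg, if_pos (by omega)]
        rw [PySem.List.pyRange_one (((2 * (jr : Int) - 1) ^ 2 + 6 * (jr : Int)))
            (((2 * (jr : Int) - 1) ^ 2 + 8 * (jr : Int) + 1))]
        have e2 : ((2 * (jr : Int) - 1) ^ 2 + 8 * (jr : Int) + 1 -
            ((2 * (jr : Int) - 1) ^ 2 + 6 * (jr : Int))).toNat = 2 * jr + 1 := by
          have e1 : ((2 * (jr : Int) - 1) ^ 2 + 8 * (jr : Int) + 1 -
              ((2 * (jr : Int) - 1) ^ 2 + 6 * (jr : Int))) = ((2 * jr + 1 : Nat) : Int) := by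
            push_cast; ring
          rw [e1, Int.toNat_natCast]
        rw [e2]
        apply List.map_congr_left
        intro u hu
        rw [List.mem_range] at hu
        rw [show ((K - jr + u : Nat) : Int) - (K : Int) = (u : Int) - (jr : Int) from by
          push_cast; omega]
        rw [vcell_eval_top _ _ (by cases abs_cases ((u : Int) - (jr : Int)) <;> push_cast <;> omega)
            (by omega)]
        push_cast; ring
  · -- right segment
    rw [List.map_map, List.map_map]
    apply List.map_congr_left
    intro u hu
    rw [List.mem_range] at hu
    simp only [Function.comp_apply]
    rw [show ((K - jr + (2 * jr + 1 + u) : Nat) : Int) - (K : Int) = (jr : Int) + (u : Int) + 1 from by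
      push_cast; omega]
    rw [vcell_eval_right _ _ (by rw [hjr]; push_cast; omega)]
    push_cast; ring

lemma altEq (a : Int) : anti_clock_alt a = spiralM (Kn a) := by
  simp only [anti_clock_alt]
  have hm : (if (if PySem.Int.mod a 2 = 0 then a - 1 else a) < 1 then 1
        else (if PySem.Int.mod a 2 = 0 then a - 1 else a)) = 2 * ((Kn a : Nat) : Int) + 1 := by
    rw [PySem.Int.mod_eq_emod_of_pos (by norm_num)]
    unfold Kn
    split_ifs <;> omega
  rw [hm]
  have hc : PySem.Int.floordiv (2 * ((Kn a : Nat) : Int) + 1 - 1) 2 = ((Kn a : Nat) : Int) := by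
    rw [PySem.Int.floordiv_eq_ediv_of_pos (by norm_num)]
    omega
  rw [hc]
  rw [show (2 * ((Kn a : Nat) : Int) + 1) = ((2 * Kn a + 1 : Nat) : Int) from by push_cast; ring]
  rw [PySem.List.pyRange_zero_natCast, List.map_map]
  rw [show spiralM (Kn a) = (List.range (2 * Kn a + 1)).map
        (fun r : Nat => spiralRow (Kn a) ((r : Int) - ((Kn a : Nat) : Int))) from rfl]
  apply List.map_congr_left
  intro r hr
  rw [List.mem_range] at hr
  simpa using rowAlt (Kn a) r hr

-- ===== VERDICT (by name: the statement is the Claim_ definition above) =====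
theorem anti_clock_spec : Claim_equal_anti_clock := by
  intro a _
  unfold Spec_anti_clock
  rw [aEq, altEq]
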